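-- pv_equiv track=rewrite | github.com/kekamphetamine/MEA-experience | sliceAnalysis-master/scratch.py | define_offsets
-- ===== SOURCE A (Python) =====
-- def define_offsets(durations):
--     keys = sorted(durations.keys())  # sort for consistency
--     offsets = {}
--     current_offset = 0
--     for key in keys:
--         offsets[key] = current_offset
--         current_offset += durations[key]
--     return offsets
-- ===== SOURCE B (Python) =====
-- def define_offsets(durations):
--     # Each key's offset is computed independently: the total duration of all
--     # strictly smaller keys (no running accumulator, no sequential dependence).
--     return {k: sum(v for j, v in durations.items() if j < k)
--             for k in sorted(durations)}
-- ===== Notes on version B (the rewrite author's own statement) =====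
-- stated objective: alternative
-- what changed: Replaces A's sequential accumulator loop with an order-independent per-key computation: each key's offset is the sum of the durations of all strictly smaller keys, gathered by a scan over the items, so no running state is threaded between iterations.
import Mathlib
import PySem

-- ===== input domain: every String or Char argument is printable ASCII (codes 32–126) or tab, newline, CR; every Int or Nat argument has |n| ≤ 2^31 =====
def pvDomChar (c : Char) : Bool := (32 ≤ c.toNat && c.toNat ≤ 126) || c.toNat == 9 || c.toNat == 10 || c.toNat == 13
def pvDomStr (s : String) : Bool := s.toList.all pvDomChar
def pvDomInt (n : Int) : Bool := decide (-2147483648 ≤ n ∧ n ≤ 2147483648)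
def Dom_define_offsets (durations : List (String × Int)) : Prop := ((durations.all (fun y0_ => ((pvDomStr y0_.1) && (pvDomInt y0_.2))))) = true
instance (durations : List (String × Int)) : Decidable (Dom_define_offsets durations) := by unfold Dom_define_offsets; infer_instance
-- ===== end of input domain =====

-- B drops A's sequential accumulator: each key's offset is computed independently as
-- the sum of the durations of all strictly smaller keys (alternative decomposition).

-- ===== PORT A =====
-- A: keys = sorted(durations.keys()); loop building offsets dict while accumulating current_offset.
def define_offsets (durations : List (String × Int)) : List (String × Int) :=
  let d := PySem.Dict.ofList durations
  let keys := PySem.List.sorted d.keys (fun k => k) false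
  let res := keys.foldl
    (fun (st : PySem.Dict String Int × Int) key =>
      (st.1.insert key st.2, st.2 + d.getD key 0))
    (PySem.Dict.empty, 0)
  res.1.items

-- ===== PORT B =====
-- B: {k: sum(v for j, v in durations.items() if j < k) for k in sorted(durations)}
def define_offsets_alt (durations : List (String × Int)) : List (String × Int) :=
  let d := PySem.Dict.ofList durations
  let keys := PySem.List.sorted d.keys (fun k => k) false
  (keys.foldl
    (fun (acc : PySem.Dict String Int) k =>
      acc.insert k (((d.items.filter (fun p => decide (p.1 < k))).map Prod.snd).sum))
    PySem.Dict.empty).items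

-- ===== PRECONDITION & SPEC =====
def Spec_define_offsets (durations : List (String × Int)) (out : List (String × Int)) : Prop := out = define_offsets_alt durations
instance (durations : List (String × Int)) (out : List (String × Int)) : Decidable (Spec_define_offsets durations out) := by unfold Spec_define_offsets; infer_instance

-- ===== CLAIM (what is proved, stated in full; the proofs are below) =====
def Claim_equal_define_offsets : Prop := ∀ (durations : List (String × Int)), Dom_define_offsets durations → Spec_define_offsets durations (define_offsets durations)

-- ===== LEMMAS AND PROOFS =====

-- port of itertools-style exclusive running sums, used only to characterise A's loop
def pyAccumulate (c : Int) (xs : List Int) : List Int :=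
  match xs with
  | [] => [c]
  | x :: rest => c :: pyAccumulate (c + x) rest

-- A's loop over fresh distinct keys appends (key, running-sum) pairs: exactly
-- the zip of the keys with the exclusive prefix sums of their values.
theorem foldA_items (d : PySem.Dict String Int) (ks : List String)
    (acc : PySem.Dict String Int) (c : Int)
    (hfresh : ∀ k ∈ ks, acc.contains k = false) (hnd : ks.Nodup) :
    (ks.foldl
      (fun (st : PySem.Dict String Int × Int) key =>
        (st.1.insert key st.2, st.2 + d.getD key 0))
      (acc, c)).1.items
    = acc.items ++ ks.zip (pyAccumulate c (ks.map (fun k => d.getD k 0))) := by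
  induction ks generalizing acc c with
  | nil => simp [pyAccumulate]
  | cons k t ih =>
    have hkacc : acc.contains k = false := hfresh k (List.mem_cons_self)
    have hndt : t.Nodup := hnd.of_cons
    have hknt : k ∉ t := (List.nodup_cons.mp hnd).1
    have hfresh' : ∀ k' ∈ t, (acc.insert k c).contains k' = false := by
      intro k' hk'
      rw [PySem.Dict.contains_insert]
      have : k' ≠ k := fun h => hknt (h ▸ hk')
      simp [this, hfresh k' (List.mem_cons_of_mem _ hk')]
    simp only [List.foldl_cons, List.map_cons, pyAccumulate, List.zip_cons_cons]
    rw [ih (acc.insert k c) (c + d.getD k 0) hfresh' hndt,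
        PySem.Dict.items_insert]
    simp [hkacc]

-- On a strictly increasing key list, the exclusive prefix sum at each key IS the
-- sum of the values of the strictly smaller keys: A's running state is redundant.
theorem zip_accumulate_eq_map_filter_sum (f : String → Int) (ks : List String) (c : Int)
    (hs : ks.Pairwise (· < ·)) :
    ks.zip (pyAccumulate c (ks.map f))
      = ks.map (fun k => (k, c + ((ks.filter (fun j => decide (j < k))).map f).sum)) := by
  induction ks generalizing c with
  | nil => rfl
  | cons k t ih =>
    have hk : ∀ j ∈ t, k < j := fun j hj => (List.pairwise_cons.mp hs).1 j hj
    have ht : t.Pairwise (· < ·) := (List.pairwise_cons.mp hs).2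
    simp only [List.map_cons, pyAccumulate, List.zip_cons_cons, List.map_cons]
    congr 1
    · -- head: no key of k :: t is strictly below k
      have hfil : (k :: t).filter (fun j => decide (j < k)) = [] := by
        rw [List.filter_eq_nil_iff]
        intro j hj
        rcases List.mem_cons.mp hj with rfl | hjt
        · simp
        · simpa using not_lt_of_gt (hk j hjt)
      rw [hfil]; simp
    · -- tail: k itself enters every smaller-key set of the tail
      rw [ih (c + f k) ht]
      apply List.map_congr_left
      intro k' hk'
      have hlt : k < k' := hk k' hk'
      have hfil : (k :: t).filter (fun j => decide (j < k'))
          = k :: t.filter (fun j => decide (j < k')) := by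
        simp only [List.filter_cons, decide_eq_true_eq]
        rw [if_pos hlt]
      rw [hfil]
      simp [add_assoc]

-- ===== VERDICT (by name: the statement is the Claim_ definition above) =====
theorem define_offsets_spec : Claim_equal_define_offsets := by
  intro durations _
  unfold Spec_define_offsets define_offsets define_offsets_alt
  simp only []
  set d := PySem.Dict.ofList durations with hd
  set keys := PySem.List.sorted d.keys (fun k => k) false with hkeys
  have hperm : keys.Perm d.keys := PySem.List.sorted_perm _ _ _
  have hndk : keys.Nodup := hperm.nodup_iff.mpr (PySem.Dict.nodup_keys_ofList durations)
  have hsle : keys.Pairwise (fun a b => a ≤ b) := PySem.List.sorted_pairwise d.keys (fun k => k) 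
  have hslt : keys.Pairwise (· < ·) :=
    (hsle.and hndk).imp (fun h => lt_of_le_of_ne h.1 h.2)
  -- A's side: the loop's items are the zip with the exclusive prefix sums,
  -- which on a strictly increasing key list are the smaller-key sums
  rw [foldA_items d keys PySem.Dict.empty 0
        (fun k _ => PySem.Dict.contains_empty k) hndk,
      zip_accumulate_eq_map_filter_sum (fun k => d.getD k 0) keys 0 hslt]
  -- B's side: the dict-comprehension fold over fresh distinct keys appends its pairs
  rw [PySem.Dict.items_foldl_insert_fresh keys (fun k => k)
        (fun k => ((d.items.filter (fun p => decide (p.1 < k))).map Prod.snd).sum)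
        PySem.Dict.empty (fun a _ => PySem.Dict.contains_empty a) (by simpa using hndk)]
  simp only [show (PySem.Dict.empty : PySem.Dict String Int).items = [] from rfl, List.nil_append]
  apply List.map_congr_left
  intro k _
  have hitems : d.items = d.keys.map (fun j => (j, d.getD j 0)) :=
    PySem.Dict.items_eq_map_keys d (PySem.Dict.nodup_keys_ofList durations) 0
  have hfil : d.items.filter (fun p => decide (p.1 < k))
      = (d.keys.filter (fun j => decide (j < k))).map (fun j => (j, d.getD j 0)) := by
    rw [hitems, List.filter_map]
    rfl
  have hsum : ((keys.filter (fun j => decide (j < k))).map (fun j => d.getD j 0)).sum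
      = ((d.items.filter (fun p => decide (p.1 < k))).map Prod.snd).sum := by
    rw [hfil, List.map_map]
    exact ((hperm.filter _).map _).sum_eq
  rw [zero_add, hsum]
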